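-- pv_equiv track=rewrite | github.com/qiqingh/contest_AE_final | A2_constraintdriven_toolchain/toolchain4_field_pair_LLM_query/inter-IE/code/generate_inter_ie_dsl_concurrent.py | sample_evidences_smart
-- ===== SOURCE A (Python) =====
-- def sample_evidences_smart(evidences, max_count=12):
--     """Intelligent sampling of evidence to avoid exceeding context length limits"""
--     if len(evidences) <= max_count:
--         return evidences
--
--     confidence_priority = {'HIGH': 4, 'MEDIUM': 3, 'LOW': 2, 'VERY_LOW': 1, 'UNKNOWN': 0}
--
--     sorted_evidences = sorted(
--         evidences,
--         key=lambda e: confidence_priority.get(e.get('confidence', 'UNKNOWN'), 0),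
--         reverse=True
--     )
--
--     sampled = []
--     seen_sections = set()
--
--     for evidence in sorted_evidences:
--         section = evidence.get('section_number', 'N/A')
--         if section not in seen_sections:
--             sampled.append(evidence)
--             seen_sections.add(section)
--             if len(sampled) >= max_count:
--                 break
--
--     if len(sampled) < max_count:
--         for evidence in sorted_evidences:
--             if evidence not in sampled:
--                 sampled.append(evidence)
--                 if len(sampled) >= max_count:
--                     break
--
--     return sampled
-- ===== SOURCE B (Python) =====
-- def sample_evidences_smart(evidences, max_count=12):
--     """Intelligent sampling of evidence to avoid exceeding context length limits"""
--     if len(evidences) <= max_count: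
--         return evidences
--
--     confidence_priority = {'HIGH': 4, 'MEDIUM': 3, 'LOW': 2, 'VERY_LOW': 1, 'UNKNOWN': 0}
--
--     ordered = sorted(
--         evidences,
--         key=lambda e: confidence_priority.get(e.get('confidence', 'UNKNOWN'), 0),
--         reverse=True
--     )
--
--     # Index-based formulation: an evidence is "diverse" iff its section does not
--     # occur earlier in the sorted order; everything is capped by one final slice.
--     secs = [e.get('section_number', 'N/A') for e in ordered]
--     diverse = [e for i, e in enumerate(ordered)
--                if e.get('section_number', 'N/A') not in secs[:i]]
--
--     extras = []
--     for i, e in enumerate(ordered):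
--         if e.get('section_number', 'N/A') in secs[:i] \
--                 and e not in diverse and e not in extras:
--             extras.append(e)
--
--     return (diverse + extras)[:max_count]
-- ===== Notes on version B (the rewrite author's own statement) =====
-- stated objective: alternative
-- what changed: A's stateful break-at-cap loops (seen-set dedup scan, then a rescan appending until the cap) are replaced by an index-based formulation: diversity is decided per element by prefix membership in a precomputed section list (a filter over enumerate, no seen-set, no break), extras are gathered the same way, and the cap is applied once by a final slice.
-- outside the precondition, e.g. on sample_evidences_smart([{}, {}], 0): A returns [{}], B returns []
import Mathlib
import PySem

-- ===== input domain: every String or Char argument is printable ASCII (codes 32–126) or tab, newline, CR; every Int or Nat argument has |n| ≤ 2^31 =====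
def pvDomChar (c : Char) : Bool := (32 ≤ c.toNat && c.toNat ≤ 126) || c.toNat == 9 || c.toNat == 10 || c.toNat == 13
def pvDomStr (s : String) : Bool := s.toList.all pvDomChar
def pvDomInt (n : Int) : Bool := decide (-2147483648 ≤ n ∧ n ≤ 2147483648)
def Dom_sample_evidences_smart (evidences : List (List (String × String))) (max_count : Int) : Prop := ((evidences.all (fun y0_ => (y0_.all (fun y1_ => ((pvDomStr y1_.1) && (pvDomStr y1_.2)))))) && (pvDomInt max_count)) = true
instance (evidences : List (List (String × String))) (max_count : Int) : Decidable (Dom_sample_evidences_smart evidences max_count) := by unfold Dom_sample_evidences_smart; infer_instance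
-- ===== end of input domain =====

-- B replaces A's stateful break-at-cap loops by an index-based formulation: diversity is a
-- per-element prefix-membership test over a precomputed section list, and the cap is one final
-- slice; same result, a different decomposition (not claimed faster).

-- ===== PORT A =====

-- confidence_priority.get(e.get('confidence', 'UNKNOWN'), 0)
def pvConfPrio (s : String) : Int :=
  if s == "HIGH" then 4
  else if s == "MEDIUM" then 3
  else if s == "LOW" then 2
  else if s == "VERY_LOW" then 1
  else if s == "UNKNOWN" then 0
  else 0

-- Python's `evidence in sampled` compares dicts: identity-or-equality, where dict == ignores
-- insertion order (same keys, same values); exact for assoc lists arising from Python dicts.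
def pvDictEq (a b : List (String × String)) : Bool :=
  (a == b) ||
    ((a.all (fun p => (PySem.Dict.mk b).get? p.1 == some p.2)) &&
     (b.all (fun p => (PySem.Dict.mk a).get? p.1 == some p.2)))

-- first for-loop of A: dedup by section, break once the cap is reached
def pvALoop1 (l : List (List (String × String))) (sampled : List (List (String × String)))
    (seen : PySem.Set String) (mc : Int) : List (List (String × String)) :=
  match l with
  | [] => sampled
  | e :: rest =>
    let sec := (PySem.Dict.mk e).getD "section_number" "N/A"
    if PySem.Set.contains seen sec then pvALoop1 rest sampled seen mc
    else
      let sampled' := sampled ++ [e]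
      let seen' := PySem.Set.add seen sec
      if mc ≤ (sampled'.length : Int) then sampled'
      else pvALoop1 rest sampled' seen' mc

-- second for-loop of A: rescan everything, append what is not yet sampled, break at the cap
def pvALoop2 (l : List (List (String × String))) (sampled : List (List (String × String)))
    (mc : Int) : List (List (String × String)) :=
  match l with
  | [] => sampled
  | e :: rest =>
    if sampled.any (fun x => pvDictEq x e) then pvALoop2 rest sampled mc
    else
      let sampled' := sampled ++ [e]
      if mc ≤ (sampled'.length : Int) then sampled'
      else pvALoop2 rest sampled' mc

def sample_evidences_smart (evidences : List (List (String × String))) (max_count : Int) :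
    List (List (String × String)) :=
  if (evidences.length : Int) ≤ max_count then evidences
  else
    let sorted_evidences := PySem.List.sorted evidences
      (fun e => pvConfPrio ((PySem.Dict.mk e).getD "confidence" "UNKNOWN")) true
    let sampled := pvALoop1 sorted_evidences [] PySem.Set.empty max_count
    if (sampled.length : Int) < max_count then pvALoop2 sorted_evidences sampled max_count
    else sampled

-- ===== PORT B =====

-- e.get('section_number', 'N/A')
def pvSec (e : List (String × String)) : String :=
  (PySem.Dict.mk e).getD "section_number" "N/A"

-- B's extras pass: elements whose section occurs earlier in `secs` and which are not yet
-- value-present in diverse or in the extras collected so far (no cap: the slice caps at the end)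
def pvBExtras (l : List ((List (String × String)) × Nat)) (secs : List String)
    (diverse extras : List (List (String × String))) : List (List (String × String)) :=
  match l with
  | [] => extras
  | (e, i) :: rest =>
    if (secs.take i).contains (pvSec e)
        && !(diverse.any (fun x => pvDictEq x e))
        && !(extras.any (fun x => pvDictEq x e)) then
      pvBExtras rest secs diverse (extras ++ [e])
    else pvBExtras rest secs diverse extras

def sample_evidences_smart_alt (evidences : List (List (String × String))) (max_count : Int) :
    List (List (String × String)) :=
  if (evidences.length : Int) ≤ max_count then evidences
  else
    let ordered := PySem.List.sorted evidences
      (fun e => pvConfPrio ((PySem.Dict.mk e).getD "confidence" "UNKNOWN")) true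
    let secs := ordered.map pvSec
    let diverse :=
      ((ordered.zipIdx).filter (fun p => !((secs.take p.2).contains (pvSec p.1)))).map Prod.fst
    let extras := pvBExtras ordered.zipIdx secs diverse []
    PySem.List.slice (diverse ++ extras) none (some max_count)

-- ===== PRECONDITION & SPEC =====
-- Pre_ excludes non-positive max_count, outside the function's natural domain of a positive
-- sampling cap, where A's append-before-check loop still returns one evidence.
def Pre_sample_evidences_smart (evidences : List (List (String × String))) (max_count : Int) : Prop :=
  1 ≤ max_count
instance (evidences : List (List (String × String))) (max_count : Int) : Decidable (Pre_sample_evidences_smart evidences max_count) := by unfold Pre_sample_evidences_smart; infer_instance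

def pvWitness_sample_evidences_smart : (List (List (String × String))) × Int :=
  ([[("confidence", "HIGH"), ("section_number", "1")], [("section_number", "1")]], 1)

def Spec_sample_evidences_smart (evidences : List (List (String × String))) (max_count : Int) (out : List (List (String × String))) : Prop := out = sample_evidences_smart_alt evidences max_count
instance (evidences : List (List (String × String))) (max_count : Int) (out : List (List (String × String))) : Decidable (Spec_sample_evidences_smart evidences max_count out) := by unfold Spec_sample_evidences_smart; infer_instance

-- ===== CLAIM =====
def Claim_equal_sample_evidences_smart : Prop := ∀ (evidences : List (List (String × String))) (max_count : Int), Dom_sample_evidences_smart evidences max_count → Pre_sample_evidences_smart evidences max_count → Spec_sample_evidences_smart evidences max_count (sample_evidences_smart evidences max_count)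

-- ===== LEMMAS AND PROOFS =====

-- proof-side characterisation of A's first loop: greedy per-section dedup, uncapped
def pvDvF (l : List (List (String × String))) (seen : PySem.Set String) :
    List (List (String × String)) :=
  match l with
  | [] => []
  | e :: rest =>
    if PySem.Set.contains seen (pvSec e) then pvDvF rest seen
    else e :: pvDvF rest (PySem.Set.add seen (pvSec e))

theorem pvDictEq_self (a : List (String × String)) : pvDictEq a a = true := by
  simp [pvDictEq]

theorem pvALoop1_eq (l : List (List (String × String)))
    (sampled : List (List (String × String))) (seen : PySem.Set String) (mc : Int)
    (h : (sampled.length : Int) < mc) :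
    pvALoop1 l sampled seen mc =
      sampled ++ (pvDvF l seen).take (mc - sampled.length).toNat := by
  induction l generalizing sampled seen with
  | nil => simp [pvALoop1, pvDvF]
  | cons e rest ih =>
    simp only [pvALoop1, pvDvF, pvSec]
    split
    · exact ih sampled seen h
    · split
      · rename_i hle
        have hmc : mc = (sampled.length : Int) + 1 := by
          simp at hle; omega
        have : (mc - (sampled.length : Int)).toNat = 1 := by omega
        simp [this]
      · rename_i hle
        simp only [List.length_append, List.length_cons] at hle
        have h' : ((sampled ++ [e]).length : Int) < mc := by
          simp; push_cast at hle ⊢; omega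
        rw [ih (sampled ++ [e]) _ h']
        have : (mc - ((sampled ++ [e]).length : Int)).toNat + 1
            = (mc - (sampled.length : Int)).toNat := by simp; omega
        rw [← this]
        simp [List.take_succ_cons]

-- B's filter over enumerate computes exactly A's greedy dedup
theorem pvDvF_filter (l : List (List (String × String))) (secs : List String) (k : Nat)
    (seen : PySem.Set String)
    (hd : secs.drop k = l.map pvSec)
    (hs : ∀ x, x ∈ seen ↔ x ∈ secs.take k) :
    ((l.zipIdx k).filter (fun p => !((secs.take p.2).contains (pvSec p.1)))).map Prod.fst
      = pvDvF l seen := by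
  induction l generalizing k seen with
  | nil => simp [pvDvF]
  | cons e rest ih =>
    have hk : secs[k]? = some (pvSec e) := by
      have : (secs.drop k)[0]? = some (pvSec e) := by rw [hd]; rfl
      simpa [List.getElem?_drop] using this
    have htake : secs.take (k+1) = secs.take k ++ [pvSec e] := by
      rw [List.take_add_one, hk]; rfl
    have hd' : secs.drop (k+1) = rest.map pvSec := by
      rw [← List.drop_drop, hd]; rfl
    have hcontains : ((secs.take k).contains (pvSec e))
        = PySem.Set.contains seen (pvSec e) := by
      rw [Bool.eq_iff_iff, PySem.Set.contains_iff]
      simp [hs]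
    rw [List.zipIdx_cons, pvDvF]
    by_cases hc : PySem.Set.contains seen (pvSec e) = true
    · rw [if_pos hc]
      have : ((secs.take k).contains (pvSec e)) = true := by rw [hcontains]; exact hc
      simp only [List.filter_cons, this, Bool.not_true, Bool.false_eq_true, if_false]
      refine ih (k+1) seen hd' ?_
      intro x
      rw [htake]
      constructor
      · intro hx; exact List.mem_append_left _ ((hs x).mp hx)
      · intro hx
        rcases List.mem_append.mp hx with h1 | h1
        · exact (hs x).mpr h1
        · have : x = pvSec e := by simpa using h1
          subst this
          exact (PySem.Set.contains_iff _ _).mp hc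
    · rw [if_neg hc]
      have : ((secs.take k).contains (pvSec e)) = false := by
        rw [hcontains]; simpa using hc
      simp only [List.filter_cons, this, Bool.not_false, if_true, List.map_cons]
      congr 1
      refine ih (k+1) (PySem.Set.add seen (pvSec e)) hd' ?_
      intro x
      rw [htake, PySem.Set.mem_add]
      simp only [List.mem_append, List.mem_singleton]
      exact or_congr (hs x) Iff.rfl

theorem pvBExtras_prefix (l : List ((List (String × String)) × Nat)) (secs : List String)
    (diverse acc : List (List (String × String))) :
    acc <+: pvBExtras l secs diverse acc := by
  induction l generalizing acc with
  | nil => exact List.prefix_refl _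
  | cons p rest ih =>
    obtain ⟨e, i⟩ := p
    simp only [pvBExtras]
    split
    · exact List.IsPrefix.trans (List.prefix_append acc [e]) (ih (acc ++ [e]))
    · exact ih acc

-- A's second loop equals B's extras pass followed by the final truncation
theorem pvALoop2_extras (l : List (List (String × String))) (secs : List String) (k : Nat)
    (D acc : List (List (String × String))) (mc : Int)
    (hd : secs.drop k = l.map pvSec)
    (hdiv : ∀ p ∈ l.zipIdx k, ((secs.take p.2).contains (pvSec p.1)) = false → p.1 ∈ D)
    (hlt : ((D ++ acc).length : Int) < mc) :
    pvALoop2 l (D ++ acc) mc = (D ++ pvBExtras (l.zipIdx k) secs D acc).take mc.toNat := by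
  induction l generalizing k acc with
  | nil =>
    simp only [pvALoop2, List.zipIdx_nil, pvBExtras]
    refine (List.take_of_length_le ?_).symm
    simp at hlt ⊢; omega
  | cons e rest ih =>
    have hd' : secs.drop (k+1) = rest.map pvSec := by
      rw [← List.drop_drop, hd]; rfl
    rw [List.zipIdx_cons] at hdiv ⊢
    simp only [pvALoop2, pvBExtras]
    by_cases hm : (D ++ acc).any (fun x => pvDictEq x e) = true
    · rw [if_pos hm]
      have hfalse : ((secs.take k).contains (pvSec e)
          && !(D.any (fun x => pvDictEq x e))
          && !(acc.any (fun x => pvDictEq x e))) = false := by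
        rw [List.any_append] at hm
        rcases Bool.or_eq_true_iff.mp hm with h1 | h1
        · simp only [h1, Bool.not_true, Bool.and_false, Bool.false_and]
        · simp only [h1, Bool.not_true, Bool.and_false]
      rw [if_neg (by rw [hfalse]; decide)]
      exact ih (k+1) acc hd' (fun p hp h => hdiv p (List.mem_cons_of_mem _ hp) h) hlt
    · have hDany : D.any (fun x => pvDictEq x e) = false := by
        rw [List.any_append] at hm
        simpa using fun h => hm (Bool.or_eq_true_iff.mpr (Or.inl h))
      have haccany : acc.any (fun x => pvDictEq x e) = false := by
        rw [List.any_append] at hm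
        simpa using fun h => hm (Bool.or_eq_true_iff.mpr (Or.inr h))
      have hsecc : ((secs.take k).contains (pvSec e)) = true := by
        by_contra hcf
        have hcf' : ((secs.take k).contains (pvSec e)) = false := by
          simpa using hcf
        have heD : e ∈ D := hdiv (e, k) (List.mem_cons_self) hcf'
        have hany : D.any (fun x => pvDictEq x e) = true :=
          List.any_eq_true.mpr ⟨e, heD, pvDictEq_self e⟩
        rw [hany] at hDany
        simp at hDany
      have hcondB : ((secs.take k).contains (pvSec e)
          && !(D.any (fun x => pvDictEq x e))
          && !(acc.any (fun x => pvDictEq x e))) = true := by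
        rw [hsecc, hDany, haccany]; decide
      rw [if_neg hm, if_pos hcondB]
      by_cases hbreak : mc ≤ (((D ++ acc) ++ [e]).length : Int)
      · rw [if_pos hbreak]
        obtain ⟨t, ht⟩ := pvBExtras_prefix (rest.zipIdx (k+1)) secs D (acc ++ [e])
        rw [← ht]
        have hassoc : D ++ ((acc ++ [e]) ++ t) = ((D ++ acc) ++ [e]) ++ t := by simp
        rw [hassoc]
        have hn : mc.toNat = ((D ++ acc) ++ [e]).length := by
          simp at hbreak hlt ⊢; omega
        rw [hn, List.take_left]
      · rw [if_neg hbreak]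
        have hlt' : ((D ++ (acc ++ [e])).length : Int) < mc := by
          simp at hbreak ⊢; push_cast; omega
        have := ih (k+1) (acc ++ [e]) hd'
          (fun p hp h => hdiv p (List.mem_cons_of_mem _ hp) h) hlt'
        rw [← List.append_assoc] at this
        exact this

-- ===== VERDICT =====
theorem sample_evidences_smart_spec : Claim_equal_sample_evidences_smart := by
  intro evidences mc _ hpre
  unfold Spec_sample_evidences_smart sample_evidences_smart sample_evidences_smart_alt
  by_cases hlen : (evidences.length : Int) ≤ mc
  · simp [hlen]
  · simp only [hlen, if_false]
    have hpre : (1 : Int) ≤ mc := hpre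
    set s := PySem.List.sorted evidences
      (fun e => pvConfPrio ((PySem.Dict.mk e).getD "confidence" "UNKNOWN")) true with hs
    set secs := s.map pvSec with hsecs
    have hD : ((s.zipIdx).filter (fun p => !((secs.take p.2).contains (pvSec p.1)))).map Prod.fst
        = pvDvF s PySem.Set.empty := by
      refine pvDvF_filter s secs 0 PySem.Set.empty rfl ?_
      intro x; simp [PySem.Set.empty]
    rw [hD]
    set D := pvDvF s PySem.Set.empty with hDdef
    have h0 : ((List.length ([] : List (List (String × String)))) : Int) < mc := by
      simp; omega
    rw [pvALoop1_eq s [] PySem.Set.empty mc h0]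
    simp only [List.nil_append, List.length_nil, Nat.cast_zero, Int.sub_zero]
    rw [PySem.List.slice_to _ (show (0:Int) ≤ mc by omega)]
    by_cases hcase : ((D.take mc.toNat).length : Int) < mc
    · have hDlen : D.length < mc.toNat := by
        simp only [List.length_take] at hcase
        omega
      have htake : D.take mc.toNat = D := List.take_of_length_le (by omega)
      rw [if_pos (by rw [htake] at hcase ⊢; exact hcase)]
      rw [htake] at hcase ⊢
      have hdiv : ∀ p ∈ s.zipIdx 0, ((secs.take p.2).contains (pvSec p.1)) = false → p.1 ∈ D := by
        intro p hp hf
        rw [← hD]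
        exact List.mem_map.mpr ⟨p, List.mem_filter.mpr ⟨hp, by simpa using hf⟩, rfl⟩
      have := pvALoop2_extras s secs 0 D [] mc rfl hdiv (by simpa using hcase)
      simpa using this
    · rw [if_neg hcase]
      obtain ⟨t, ht⟩ := pvBExtras_prefix (s.zipIdx) secs D []
      simp only [List.nil_append] at ht
      rw [← ht]
      have hge : mc.toNat ≤ D.length := by
        simp only [List.length_take] at hcase
        omega
      rw [List.take_append_of_le_length (by omega), ← hDdef]
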